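-- pv_equiv track=rewrite | github.com/sunkyoyoon/leetcode | 3862-find-the-smallest-balanced-index.py | smallestBalancedIndex
-- ===== SOURCE A (Python) =====
-- def smallestBalancedIndex(nums: list[int]) -> int:
--     left = sum(nums)
--
--     right = 1
--
--     for i in range(len(nums)-1,-1,-1):
--         left -= nums[i]
--         if left == right:
--             return i
--         right *= nums[i]
--     return -1
-- ===== SOURCE B (Python) =====
-- def smallestBalancedIndex(nums: list[int]) -> int:
--     # One reverse pass builds suffix products, one forward pass keeps the
--     # last (largest) index whose prefix sum equals its suffix product.
--     sufs = []
--     p = 1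
--     for x in reversed(nums):
--         sufs.append(p)
--         p *= x
--     sufs.reverse()  # sufs[i] = product of nums[i+1:]
--     ans = -1
--     pre = 0
--     for i, x in enumerate(nums):
--         if pre == sufs[i]:
--             ans = i
--         pre += x
--     return ans
-- ===== Notes on version B (the rewrite author's own statement) =====
-- stated objective: alternative
-- what changed: Replaces A's single backward scan with early return by a two-pass scheme: a reverse pass precomputing suffix products, then a forward pass over prefix sums that overwrites the answer, so the returned index is the last forward match (= A's first backward match).
import Mathlib
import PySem

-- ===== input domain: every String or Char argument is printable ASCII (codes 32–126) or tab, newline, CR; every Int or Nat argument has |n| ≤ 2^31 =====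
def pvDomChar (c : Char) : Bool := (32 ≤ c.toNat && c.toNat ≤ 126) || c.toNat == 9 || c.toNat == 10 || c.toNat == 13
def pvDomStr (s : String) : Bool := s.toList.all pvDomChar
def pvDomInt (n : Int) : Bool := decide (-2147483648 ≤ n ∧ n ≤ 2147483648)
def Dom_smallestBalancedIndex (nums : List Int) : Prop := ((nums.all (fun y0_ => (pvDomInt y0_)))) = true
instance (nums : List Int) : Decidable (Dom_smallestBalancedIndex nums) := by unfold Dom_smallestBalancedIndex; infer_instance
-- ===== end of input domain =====

-- B replaces A's backward scan with early return by a suffix-product precomputation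
-- plus a forward overwrite scan (objective: alternative decomposition, same cost).

-- ===== PORT A =====
-- A's backward loop with early return; the indices visited are always in range,
-- so pyGetD with default 0 is exact here.
def pvALoop (nums : List Int) (idxs : List Int) (left right : Int) : Int :=
  match idxs with
  | [] => -1
  | i :: rest =>
      let v := PySem.List.pyGetD nums i 0
      let left' := left - v
      if left' = right then i
      else pvALoop nums rest left' (right * v)

def smallestBalancedIndex (nums : List Int) : Int :=
  pvALoop nums (PySem.List.pyRange ((nums.length : Int) - 1) (-1) (-1)) nums.sum 1

-- ===== PORT B =====
-- transliteration of Source B: a reverse pass appending suffix products, reverse the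
-- built list, then a forward pass over enumerate(nums) keeping the last match.
-- sufs[i] is always in range at the indices enumerate yields, so pyGetD 0 is exact.
def smallestBalancedIndex_alt (nums : List Int) : Int :=
  let st := nums.reverse.foldl (fun (st : List Int × Int) x => (st.1 ++ [st.2], st.2 * x)) ([], 1)
  let sufs := st.1.reverse
  let fin := (PySem.List.enumerate nums).foldl
      (fun (st : Int × Int) ix =>
        (st.1 + ix.2, if st.1 = PySem.List.pyGetD sufs ix.1 0 then ix.1 else st.2)) (0, -1)
  fin.2

-- ===== PRECONDITION & SPEC =====
def Spec_smallestBalancedIndex (nums : List Int) (out : Int) : Prop := out = smallestBalancedIndex_alt nums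
instance (nums : List Int) (out : Int) : Decidable (Spec_smallestBalancedIndex nums out) := by unfold Spec_smallestBalancedIndex; infer_instance

-- ===== CLAIM (what is proved, stated in full; the proofs are below) =====
def Claim_equal_smallestBalancedIndex : Prop := ∀ (nums : List Int), Dom_smallestBalancedIndex nums → Spec_smallestBalancedIndex nums (smallestBalancedIndex nums)

-- ===== LEMMAS AND PROOFS =====

-- the common reference value: the largest j < k with sum(nums[:j]) = prod(nums[j+1:]), else -1
def pvBack (nums : List Int) : Nat → Int
  | 0 => -1
  | k+1 => if (nums.take k).sum = (nums.drop (k+1)).prod then (k : Int) else pvBack nums k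

theorem pv_sum_take_succ (nums : List Int) (k : Nat) (h : k < nums.length) :
    (nums.take (k+1)).sum = (nums.take k).sum + nums[k] := by
  rw [← List.take_concat_get (h := h), List.concat_eq_append, List.sum_append,
    List.sum_cons, List.sum_nil, add_zero]

-- A's backward loop, entered with k indices left, computes pvBack
theorem pvALoop_eq_back (nums : List Int) :
    ∀ (k : Nat), k ≤ nums.length →
      pvALoop nums (PySem.List.pyRange ((k : Int) - 1) (-1) (-1)) ((nums.take k).sum) ((nums.drop k).prod)
        = pvBack nums k := by
  intro k
  induction k with
  | zero =>
      intro _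
      rw [PySem.List.pyRange_neg_one_eq_nil (by norm_num)]
      simp [pvALoop, pvBack]
  | succ k ih =>
      intro hk
      have hklt : k < nums.length := by omega
      have hcons : PySem.List.pyRange (((k+1 : Nat) : Int) - 1) (-1) (-1)
          = (k : Int) :: PySem.List.pyRange ((k : Int) - 1) (-1) (-1) := by
        have h1 : (((k+1 : Nat) : Int) - 1) = (k : Int) := by push_cast; ring
        rw [h1, PySem.List.pyRange_neg_one_cons (by omega)]
      rw [hcons]
      have hv : PySem.List.pyGetD nums ((k : Int)) 0 = nums[k] := by
        rw [PySem.List.pyGetD_natCast, List.getD_eq_getElem?_getD,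
          List.getElem?_eq_getElem hklt, Option.getD_some]
      show (if (nums.take (k+1)).sum - PySem.List.pyGetD nums ((k:Int)) 0 = (nums.drop (k+1)).prod
            then (k : Int)
            else pvALoop nums (PySem.List.pyRange ((k : Int) - 1) (-1) (-1))
              ((nums.take (k+1)).sum - PySem.List.pyGetD nums ((k:Int)) 0)
              ((nums.drop (k+1)).prod * PySem.List.pyGetD nums ((k:Int)) 0))
          = pvBack nums (k+1)
      rw [hv, pv_sum_take_succ nums k hklt]
      have hsum : (nums.take k).sum + nums[k] - nums[k] = (nums.take k).sum := by ring
      have hdrop : (nums.drop (k+1)).prod * nums[k] = (nums.drop k).prod := by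
        rw [List.drop_eq_getElem_cons hklt, List.prod_cons]; ring
      rw [hsum, hdrop, ih (by omega)]
      rfl

-- B's suffix-building pass, characterised in closed form
theorem pvBuild (ys : List Int) :
    ∀ (lst : List Int) (p : Int),
      ys.foldl (fun (st : List Int × Int) x => (st.1 ++ [st.2], st.2 * x)) (lst, p)
        = (lst ++ (List.range ys.length).map (fun j => p * (ys.take j).prod), p * ys.prod) := by
  induction ys with
  | nil => intro lst p; simp
  | cons y ys ih =>
      intro lst p
      rw [List.foldl_cons]
      show ys.foldl (fun (st : List Int × Int) x => (st.1 ++ [st.2], st.2 * x)) (lst ++ [p], p * y) = _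
      rw [ih]
      simp only [List.length_cons, List.range_succ_eq_map, List.map_cons, List.map_map,
        Prod.mk.injEq, List.take_zero, List.prod_nil, List.prod_cons,
        mul_one, List.append_assoc, List.singleton_append, mul_assoc]
      exact ⟨rfl, trivial⟩

-- B's suffix list, element by element: sufs[k] = prod(nums[k+1:])
theorem pvSufs_get (nums : List Int) (k : Nat) (hk : k < nums.length) :
    PySem.List.pyGetD
      ((nums.reverse.foldl (fun (st : List Int × Int) x => (st.1 ++ [st.2], st.2 * x)) ([], 1)).1.reverse)
      ((k : Nat) : Int) 0
      = (nums.drop (k+1)).prod := by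
  rw [pvBuild]
  simp only [List.nil_append, PySem.List.pyGetD_natCast]
  have hk' : k < ((List.range nums.reverse.length).map (fun j => 1 * (nums.reverse.take j).prod)).reverse.length := by
    simpa using hk
  rw [List.getD_eq_getElem?_getD, List.getElem?_eq_getElem hk', Option.getD_some,
    List.getElem_reverse, List.getElem_map, List.getElem_range]
  have hlen : ((List.range nums.reverse.length).map (fun j => 1 * (nums.reverse.take j).prod)).length = nums.length := by simp
  have h1 : nums.reverse.take (((List.range nums.reverse.length).map (fun j => 1 * (nums.reverse.take j).prod)).length - 1 - k)
      = (nums.drop (k + 1)).reverse := by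
    rw [hlen, List.take_reverse]
    congr 1
    congr 1
    omega
  rw [h1, List.prod_reverse, one_mul]

-- B's forward pass over enumerate, as a fold over range
theorem pvFwd (q : Int → Int) :
    ∀ (xs : List Int) (s pre ans : Int),
      ((PySem.List.enumerate xs s).foldl
          (fun (st : Int × Int) ix =>
            (st.1 + ix.2, if st.1 = q ix.1 then ix.1 else st.2)) (pre, ans)).2
        = (List.range xs.length).foldl
            (fun a k => if pre + (xs.take k).sum = q (s + (k : Int)) then s + (k : Int) else a) ans := by
  intro xs
  induction xs with
  | nil => intro s pre ans; simp [PySem.List.enumerate_nil]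
  | cons x xs ih =>
      intro s pre ans
      rw [PySem.List.enumerate_cons, List.foldl_cons]
      show ((PySem.List.enumerate xs (s+1)).foldl _ (pre + x, if pre = q s then s else ans)).2 = _
      rw [ih]
      simp only [List.length_cons, List.range_succ_eq_map, List.foldl_cons, List.foldl_map,
        List.take_zero, List.sum_nil, Nat.cast_zero, add_zero, Nat.succ_eq_add_one,
        List.take_succ_cons, List.sum_cons, Nat.cast_add, Nat.cast_one]
      apply PySem.List.foldl_congr_mem
      intro acc k _
      have h1 : s + ((k : Int) + 1) = s + 1 + (k : Int) := by ring
      rw [h1, ← add_assoc]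

-- the overwrite fold over range 0..k computes pvBack
theorem pvFoldRange (nums : List Int) :
    ∀ (k : Nat),
      (List.range k).foldl
          (fun a j => if (nums.take j).sum = (nums.drop (j+1)).prod then (j : Int) else a) (-1)
        = pvBack nums k := by
  intro k
  induction k with
  | zero => simp [pvBack]
  | succ k ih => rw [List.range_succ, List.foldl_append, List.foldl_cons, List.foldl_nil, ih]; rfl

-- ===== VERDICT (by name: the statement is the Claim_ definition above) =====
theorem smallestBalancedIndex_spec : Claim_equal_smallestBalancedIndex := by
  intro nums _
  unfold Spec_smallestBalancedIndex
  have hA : smallestBalancedIndex nums = pvBack nums nums.length := by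
    have h := pvALoop_eq_back nums nums.length le_rfl
    simpa [smallestBalancedIndex] using h
  have hB : smallestBalancedIndex_alt nums = pvBack nums nums.length := by
    show ((PySem.List.enumerate nums).foldl
        (fun (st : Int × Int) ix =>
          (st.1 + ix.2,
            if st.1 = PySem.List.pyGetD
                ((nums.reverse.foldl (fun (st : List Int × Int) x => (st.1 ++ [st.2], st.2 * x)) ([], 1)).1.reverse)
                ix.1 0
            then ix.1 else st.2)) ((0 : Int), (-1 : Int))).2 = pvBack nums nums.length
    rw [pvFwd (fun j => PySem.List.pyGetD
        ((nums.reverse.foldl (fun (st : List Int × Int) x => (st.1 ++ [st.2], st.2 * x)) ([], 1)).1.reverse) j 0)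
      nums 0 0 (-1)]
    have hcongr :
        (List.range nums.length).foldl
            (fun a k => if (0 : Int) + (nums.take k).sum
                = PySem.List.pyGetD
                    ((nums.reverse.foldl (fun (st : List Int × Int) x => (st.1 ++ [st.2], st.2 * x)) ([], 1)).1.reverse)
                    ((0 : Int) + (k : Int)) 0
              then (0 : Int) + (k : Int) else a) (-1)
          = (List.range nums.length).foldl
              (fun a j => if (nums.take j).sum = (nums.drop (j+1)).prod then (j : Int) else a) (-1) := by
      apply PySem.List.foldl_congr_mem
      intro acc k hkmem
      have hk : k < nums.length := List.mem_range.mp hkmem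
      rw [zero_add, zero_add, pvSufs_get nums k hk]
    rw [hcongr, pvFoldRange]
  rw [hA, hB]
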